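-- pv_equiv track=rewrite | github.com/louspringer/tidb-agentx-hackathon | src/model_driven_projection/final_projection_system.py | _fix_assert_statements
-- ===== SOURCE A (Python) =====
-- def _fix_assert_statements(code: str) -> str:
--     """Replace assert statements with proper error handling."""
--     # Replace assert statements with if/raise
--     lines = code.split("\n")
--     fixed_lines = []
--
--     for line in lines:
--         if "assert " in line:
--             # Convert assert to if/raise
--             if "assert timeout_minutes is not None" in line:
--                 fixed_lines.append("        if timeout_minutes is None:")
--                 fixed_lines.append(
--                     "            raise ValueError('session_timeout_minutes should be set')",
--                 )
--             else:
--                 # Keep other assert statements for now (they might be in tests)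
--                 fixed_lines.append(line)
--         else:
--             fixed_lines.append(line)
--
--     return "\n".join(fixed_lines)
-- ===== SOURCE B (Python) =====
-- def _fix_assert_statements(code: str) -> str:
--     """Replace assert statements with proper error handling.
--
--     Single streaming pass over the characters: the current line is buffered,
--     and at each newline (and at the end) either the buffered line or the
--     hard-coded if/raise replacement is emitted; no list of lines is built.
--     """
--     NEEDLE = "assert timeout_minutes is not None"
--     REPL = (
--         "        if timeout_minutes is None:\n"
--         "            raise ValueError('session_timeout_minutes should be set')"
--     )
--     out = []
--     buf = ""
--     for ch in code:
--         if ch == "\n":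
--             out.append(REPL if NEEDLE in buf else buf)
--             out.append("\n")
--             buf = ""
--         else:
--             buf += ch
--     out.append(REPL if NEEDLE in buf else buf)
--     return "".join(out)
-- ===== Notes on version B (the rewrite author's own statement) =====
-- stated objective: alternative
-- what changed: Replaces A's split-into-a-list-of-lines / loop-appending-to-a-second-list / join pipeline by a single streaming pass over the characters that buffers the current line and emits either it or the replacement at each newline, never materialising a list of lines.
import Mathlib
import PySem

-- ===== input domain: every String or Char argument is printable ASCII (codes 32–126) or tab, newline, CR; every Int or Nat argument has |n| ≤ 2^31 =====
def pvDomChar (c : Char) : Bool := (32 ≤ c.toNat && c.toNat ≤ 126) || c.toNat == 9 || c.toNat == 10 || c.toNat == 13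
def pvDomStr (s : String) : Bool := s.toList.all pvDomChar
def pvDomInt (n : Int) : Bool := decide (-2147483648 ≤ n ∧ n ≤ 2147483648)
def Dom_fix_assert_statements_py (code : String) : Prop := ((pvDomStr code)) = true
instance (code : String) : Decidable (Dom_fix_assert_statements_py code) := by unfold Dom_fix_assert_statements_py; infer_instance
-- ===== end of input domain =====

-- B replaces A's split-into-lines / loop / join pipeline by a single streaming pass
-- over the characters (objective: alternative, same cost); return values proved equal.

-- ===== PORT A =====
-- literal transliteration of A: split on "\n", loop appending to fixed_lines, join
def fix_assert_statements_py (code : String) : String :=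
  let lines : List String := (PySem.Chars.splitOn code.toList "\n".toList).map String.ofList
  let fixed_lines : List String :=
    lines.foldl (fun acc line =>
      if PySem.Str.isIn "assert " line then
        if PySem.Str.isIn "assert timeout_minutes is not None" line then
          acc ++ ["        if timeout_minutes is None:"]
              ++ ["            raise ValueError('session_timeout_minutes should be set')"]
        else
          acc ++ [line]
      else
        acc ++ [line]) []
  PySem.Str.join "\n" fixed_lines

-- ===== PORT B =====
def bNeedle : List Char := "assert timeout_minutes is not None".toList
def bRepl : List Char :=
  ("        if timeout_minutes is None:\n            raise ValueError('session_timeout_minutes should be set')").toList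
-- out.append(REPL if NEEDLE in buf else buf)
def bEmit (buf : List Char) : List Char :=
  if PySem.Chars.isIn bNeedle buf then bRepl else buf
-- the for-loop of Source B: stream the characters, buffering the current line in buf
def bRun : List Char → List Char → List Char
  | [], buf => bEmit buf
  | c :: cs, buf => if c = '\n' then bEmit buf ++ '\n' :: bRun cs [] else bRun cs (buf ++ [c])

def fix_assert_statements_py_alt (code : String) : String :=
  String.ofList (bRun code.toList [])

-- ===== PRECONDITION & SPEC =====
def Spec_fix_assert_statements_py (code : String) (out : String) : Prop := out = fix_assert_statements_py_alt code
instance (code : String) (out : String) : Decidable (Spec_fix_assert_statements_py code out) := by unfold Spec_fix_assert_statements_py; infer_instance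

-- ===== CLAIM (what is proved, stated in full; the proofs are below) =====
def Claim_equal_fix_assert_statements_py : Prop := ∀ (code : String), Dom_fix_assert_statements_py code → Spec_fix_assert_statements_py code (fix_assert_statements_py code)

-- ===== LEMMAS AND PROOFS =====

-- reference splitter: Python's split("\n") as plain structural recursion
def mySplit (pre : List Char) : List Char → List (List Char)
  | [] => [pre]
  | c :: cs => if c = '\n' then pre :: mySplit [] cs else mySplit (pre ++ [c]) cs

theorem mySplit_ne_nil (pre : List Char) (l : List Char) : mySplit pre l ≠ [] := by
  cases l with
  | nil => simp [mySplit]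
  | cons c cs => simp only [mySplit]; split_ifs <;> simp [mySplit_ne_nil]

theorem go_step (fuel : Nat) (c : Char) (rest cur : List Char) (acc : List (List Char)) :
    PySem.Chars.splitOn.go "\n".toList (fuel+1) (c :: rest) cur acc =
    (if c = '\n' then PySem.Chars.splitOn.go "\n".toList fuel rest [] (cur.reverse :: acc)
     else PySem.Chars.splitOn.go "\n".toList fuel rest (c :: cur) acc) := by
  by_cases hc : c = '\n'
  · subst hc; simp [PySem.Chars.splitOn.go, List.isPrefixOf]
  · simp [PySem.Chars.splitOn.go, List.isPrefixOf, hc, Ne.symm hc]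

theorem go_eq_mySplit (l : List Char) : ∀ (fuel : Nat) (cur : List Char) (acc : List (List Char)),
    l.length < fuel →
    PySem.Chars.splitOn.go "\n".toList fuel l cur acc = acc.reverse ++ mySplit cur.reverse l := by
  induction l with
  | nil =>
    intro fuel cur acc h
    match fuel, h with
    | fuel + 1, _ => simp [PySem.Chars.splitOn.go, mySplit]
  | cons c cs ih =>
    intro fuel cur acc h
    match fuel, h with
    | fuel + 1, h =>
      rw [go_step]
      by_cases hc : c = '\n'
      · subst hc
        rw [if_pos rfl]
        rw [ih fuel [] (cur.reverse :: acc) (by simpa using h)]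
        simp [mySplit]
      · rw [if_neg hc]
        rw [ih fuel (c :: cur) acc (by simpa using h)]
        simp [mySplit, hc]

theorem splitOn_eq_mySplit (s : List Char) :
    PySem.Chars.splitOn s "\n".toList = mySplit [] s := by
  simpa [PySem.Chars.splitOn] using go_eq_mySplit s (s.length + 1) [] [] (by omega)

theorem join_cons (nl x : List Char) (ls : List (List Char)) :
    PySem.Chars.join nl (x :: ls) = x ++ (if ls.isEmpty then [] else nl ++ PySem.Chars.join nl ls) := by
  cases ls <;> simp [PySem.Chars.join, List.intercalate, List.intersperse]

-- per-line emission of A at the Chars level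
def fBlock (line : List Char) : List (List Char) :=
  if PySem.Chars.isIn bNeedle line then
    ["        if timeout_minutes is None:".toList,
     "            raise ValueError('session_timeout_minutes should be set')".toList]
  else [line]

theorem join_flatMap_eq_map_bEmit (ls : List (List Char)) :
    PySem.Chars.join "\n".toList (ls.flatMap fBlock) =
      PySem.Chars.join "\n".toList (ls.map bEmit) := by
  induction ls with
  | nil => rfl
  | cons a ls ih =>
    have hemp : (ls.flatMap fBlock).isEmpty = ls.isEmpty := by
      cases ls with
      | nil => rfl
      | cons b ls' =>
        simp only [List.flatMap_cons]
        unfold fBlock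
        split_ifs <;> simp
    by_cases hn : PySem.Chars.isIn bNeedle a = true
    · have hf : fBlock a = ["        if timeout_minutes is None:".toList,
        "            raise ValueError('session_timeout_minutes should be set')".toList] := by
        simp [fBlock, hn]
      have he : bEmit a = bRepl := by simp [bEmit, hn]
      rw [List.flatMap_cons, List.map_cons, hf, he, join_cons]
      rw [show (["        if timeout_minutes is None:".toList,
        "            raise ValueError('session_timeout_minutes should be set')".toList] : List (List Char)) ++ ls.flatMap fBlock =
        "        if timeout_minutes is None:".toList ::
          ("            raise ValueError('session_timeout_minutes should be set')".toList :: ls.flatMap fBlock) from rfl]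
      rw [join_cons, join_cons, ih, hemp, List.isEmpty_map]
      cases hls : ls.isEmpty <;> simp [bRepl]
    · have hn' : PySem.Chars.isIn bNeedle a = false := by simpa using hn
      have hf : fBlock a = [a] := by simp [fBlock, hn']
      have he : bEmit a = a := by simp [bEmit, hn']
      rw [List.flatMap_cons, List.map_cons, hf, he]
      rw [show ([a] : List (List Char)) ++ ls.flatMap fBlock = a :: ls.flatMap fBlock from rfl]
      rw [join_cons, join_cons, ih, hemp, List.isEmpty_map]

theorem bRun_eq (cs : List Char) : ∀ buf : List Char,
    bRun cs buf = PySem.Chars.join "\n".toList ((mySplit buf cs).map bEmit) := by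
  induction cs with
  | nil => intro buf; simp [bRun, mySplit, PySem.Chars.join, List.intercalate]
  | cons c cs ih =>
    intro buf
    by_cases hc : c = '\n'
    · subst hc
      have hnn : ((mySplit [] cs).map bEmit).isEmpty = false := by
        simp [mySplit_ne_nil]
      rw [show bRun ('\n' :: cs) buf = bEmit buf ++ '\n' :: bRun cs [] from by simp [bRun]]
      rw [show mySplit buf ('\n' :: cs) = buf :: mySplit [] cs from by simp [mySplit]]
      rw [List.map_cons, join_cons, hnn, ih []]
      simp
    · simp only [bRun, mySplit, if_neg hc]
      exact ih (buf ++ [c])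

theorem assert_of_needle (l : List Char) (h : PySem.Chars.isIn bNeedle l = true) :
    PySem.Chars.isIn "assert ".toList l = true := by
  rw [PySem.Chars.isIn_iff_infix] at *
  exact List.IsInfix.trans (by decide) h

theorem gBlock_chars (l : List Char) :
    (if PySem.Str.isIn "assert " (String.ofList l) then
       if PySem.Str.isIn "assert timeout_minutes is not None" (String.ofList l) then
         (["        if timeout_minutes is None:",
           "            raise ValueError('session_timeout_minutes should be set')"] : List String)
       else [String.ofList l]
     else [String.ofList l]).map String.toList = fBlock l := by
  simp only [PySem.Str.isIn, String.toList_ofList]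
  by_cases hn : PySem.Chars.isIn bNeedle l = true
  · have hn2 : PySem.Chars.isIn "assert timeout_minutes is not None".toList l = true := hn
    rw [if_pos (assert_of_needle l hn), if_pos hn2]
    simp [fBlock, hn]
  · have hn' : PySem.Chars.isIn bNeedle l = false := by simpa using hn
    have hn2 : PySem.Chars.isIn "assert timeout_minutes is not None".toList l = false := hn'
    by_cases ha : PySem.Chars.isIn "assert ".toList l = true
    · rw [if_pos ha, if_neg (by simpa using hn2)]
      simp [fBlock, hn']
    · rw [if_neg ha]
      simp [fBlock, hn']

-- ===== VERDICT (by name: the statement is the Claim_ definition above) =====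
theorem fix_assert_statements_py_spec : Claim_equal_fix_assert_statements_py := by
  intro code _
  unfold Spec_fix_assert_statements_py fix_assert_statements_py fix_assert_statements_py_alt
  simp only []
  rw [show (fun (acc : List String) (line : String) =>
      if PySem.Str.isIn "assert " line then
        if PySem.Str.isIn "assert timeout_minutes is not None" line then
          acc ++ ["        if timeout_minutes is None:"]
              ++ ["            raise ValueError('session_timeout_minutes should be set')"]
        else acc ++ [line]
      else acc ++ [line]) = (fun acc line => acc ++
        (if PySem.Str.isIn "assert " line then
          if PySem.Str.isIn "assert timeout_minutes is not None" line then
            ["        if timeout_minutes is None:",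
             "            raise ValueError('session_timeout_minutes should be set')"]
          else [line]
        else [line])) from by
    funext acc line; split_ifs <;> simp]
  rw [PySem.List.foldl_append_eq_flatMap]
  rw [List.nil_append, PySem.Str.join]
  rw [List.map_flatMap, List.flatMap_map]
  rw [show (fun l => (if PySem.Str.isIn "assert " (String.ofList l) then
        if PySem.Str.isIn "assert timeout_minutes is not None" (String.ofList l) then
          (["        if timeout_minutes is None:",
            "            raise ValueError('session_timeout_minutes should be set')"] : List String)
        else [String.ofList l]
      else [String.ofList l]).map String.toList) = fBlock from funext gBlock_chars]
  rw [join_flatMap_eq_map_bEmit, splitOn_eq_mySplit, ← bRun_eq]
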